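-- pv_equiv track=rewrite | github.com/ernanhughes/stephanie | stephanie/models/ner_retriever.py | _keyword_based_domain_detection
-- ===== SOURCE A (Python) =====
-- def _keyword_based_domain_detection(query: str) -> str:
--     """Simple keyword-based domain detection as fallback"""
--     query_lower = query.lower()
--
--     domain_keywords = {
--         "legal": [
--             "law",
--             "court",
--             "judge",
--             "case",
--             "legal",
--             "act",
--             "statute",
--         ],
--         "scientific": [
--             "science",
--             "research",
--             "study",
--             "experiment",
--             "data",
--             "hypothesis",
--         ],
--         "creative": ["story", "poem", "novel", "creative", "art", "music"],
--         "technical": [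
--             "code",
--             "algorithm",
--             "software",
--             "programming",
--             "technical",
--         ],
--     }
--
--     # Count keyword matches
--     scores = {domain: 0 for domain in domain_keywords}
--     for domain, keywords in domain_keywords.items():
--         for kw in keywords:
--             if kw in query_lower:
--                 scores[domain] += 1
--
--     # Return highest scoring domain or 'general'
--     return (
--         max(scores, key=scores.get)
--         if max(scores.values()) > 0
--         else "general"
--     )
-- ===== SOURCE B (Python) =====
-- def _matched_keywords(query_lower, all_keywords):
--     """One left-to-right scan of the text: at each position collect every
--     keyword that starts there.  A keyword is matched iff it starts somewhere."""
--     found = set()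
--     for i in range(len(query_lower)):
--         tail = query_lower[i:]
--         for kw in all_keywords:
--             if tail.startswith(kw):
--                 found.add(kw)
--     return found
--
--
-- def _keyword_based_domain_detection(query: str) -> str:
--     """Keyword-based domain detection, text-driven: scan the query once to
--     build the set of matched keywords, then select the best domain."""
--     query_lower = query.lower()
--
--     table = [
--         ("legal", ["law", "court", "judge", "case", "legal", "act", "statute"]),
--         ("scientific", ["science", "research", "study", "experiment", "data", "hypothesis"]),
--         ("creative", ["story", "poem", "novel", "creative", "art", "music"]),
--         ("technical", ["code", "algorithm", "software", "programming", "technical"]),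
--     ]
--     all_keywords = [kw for _, kws in table for kw in kws]
--
--     found = _matched_keywords(query_lower, all_keywords)
--
--     best_domain, best_score = "general", 0
--     for domain, keywords in table:
--         score = sum(1 for kw in keywords if kw in found)
--         if score > best_score:
--             best_domain, best_score = domain, score
--     return best_domain
-- ===== Notes on version B (the rewrite author's own statement) =====
-- stated objective: alternative
-- what changed: A does a keyword-driven pass ('kw in query' for each keyword) accumulating a scores dict and then two max scans; B is text-driven: it walks the lowered query position by position collecting into a set every keyword that starts at that position, then selects the best domain from that matched-keyword set with a strictly-improving accumulator seeded at ('general', 0), so no scores dict and no max scans.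
import Mathlib
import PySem

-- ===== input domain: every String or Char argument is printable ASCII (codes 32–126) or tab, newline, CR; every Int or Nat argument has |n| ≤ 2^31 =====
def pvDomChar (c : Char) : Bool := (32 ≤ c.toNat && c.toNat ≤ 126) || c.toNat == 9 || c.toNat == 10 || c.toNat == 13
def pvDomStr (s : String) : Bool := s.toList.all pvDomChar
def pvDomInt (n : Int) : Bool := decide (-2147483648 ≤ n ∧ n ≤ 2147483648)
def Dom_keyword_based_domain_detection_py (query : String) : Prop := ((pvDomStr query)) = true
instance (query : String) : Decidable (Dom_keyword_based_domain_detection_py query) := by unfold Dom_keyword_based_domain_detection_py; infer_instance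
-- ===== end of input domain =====

-- B replaces A's keyword-driven scores-dict + two max scans with a text-driven single scan of the query that
-- collects the set of keywords starting at each position, then a strictly-improving best-domain selection; objective: alternative.

-- ===== PORT A =====
-- the literal dict of domain keywords used by A
def pvKwDictA : PySem.Dict String (List String) :=
  PySem.Dict.ofList
    [ ("legal", ["law", "court", "judge", "case", "legal", "act", "statute"])
    , ("scientific", ["science", "research", "study", "experiment", "data", "hypothesis"])
    , ("creative", ["story", "poem", "novel", "creative", "art", "music"])
    , ("technical", ["code", "algorithm", "software", "programming", "technical"]) ]

def keyword_based_domain_detection_py (query : String) : String :=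
  let query_lower := PySem.Str.lower query
  let domain_keywords := pvKwDictA
  -- scores = {domain: 0 for domain in domain_keywords}
  let scores0 : PySem.Dict String Int :=
    domain_keywords.keys.foldl (fun d domain => d.insert domain 0) PySem.Dict.empty
  -- for domain, keywords in domain_keywords.items(): for kw in keywords: if kw in query_lower: scores[domain] += 1
  let scores : PySem.Dict String Int :=
    domain_keywords.items.foldl
      (fun d p =>
        p.2.foldl (fun d kw => if PySem.Str.isIn kw query_lower then d.modify p.1 0 (· + 1) else d) d)
      scores0
  -- max(scores, key=scores.get) if max(scores.values()) > 0 else "general"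
  -- (scores is nonempty so both max? are some; the none branches are unreachable totalizations)
  match PySem.List.max? scores.values (fun v => v) with
  | none => "general"
  | some m =>
    if m > 0 then
      match PySem.List.max? scores.keys (fun k => scores.getD k 0) with
      | none => "general"
      | some dom => dom
    else "general"

-- ===== PORT B =====
-- B's literal list of (domain, keywords) pairs
def pvKwPairsB : List (String × List String) :=
  [ ("legal", ["law", "court", "judge", "case", "legal", "act", "statute"])
  , ("scientific", ["science", "research", "study", "experiment", "data", "hypothesis"])
  , ("creative", ["story", "poem", "novel", "creative", "art", "music"])
  , ("technical", ["code", "algorithm", "software", "programming", "technical"]) ]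

-- all_keywords = [kw for _, kws in table for kw in kws]
def pvAllKwsB : List String := pvKwPairsB.flatMap (fun p => p.2)

-- helper _matched_keywords: one left-to-right scan of the text; at each position add every keyword starting there
def pvFoundB (query_lower : String) : PySem.Set String :=
  (PySem.List.pyRange 0 (PySem.Str.len query_lower) 1).foldl
    (fun found i =>
      let tail := PySem.Str.slice query_lower (some i) none
      pvAllKwsB.foldl
        (fun (s : PySem.Set String) kw => if PySem.Str.startswith tail kw then PySem.Set.add s kw else s)
        found)
    PySem.Set.empty

def keyword_based_domain_detection_py_alt (query : String) : String :=
  let query_lower := PySem.Str.lower query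
  let found := pvFoundB query_lower
  -- best_domain, best_score = "general", 0; update only on a strictly greater score
  (pvKwPairsB.foldl
    (fun (acc : String × Int) p =>
      let score : Int := (p.2.countP (fun kw => PySem.Set.contains found kw) : Nat)
      if score > acc.2 then (p.1, score) else acc)
    ("general", 0)).1

-- ===== PRECONDITION & SPEC =====
def Spec_keyword_based_domain_detection_py (query : String) (out : String) : Prop := out = keyword_based_domain_detection_py_alt query
instance (query : String) (out : String) : Decidable (Spec_keyword_based_domain_detection_py query out) := by unfold Spec_keyword_based_domain_detection_py; infer_instance

-- ===== CLAIM (what is proved, stated in full; the proofs are below) =====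
def Claim_equal_keyword_based_domain_detection_py : Prop := ∀ (query : String), Dom_keyword_based_domain_detection_py query → Spec_keyword_based_domain_detection_py query (keyword_based_domain_detection_py query)

-- ===== LEMMAS AND PROOFS =====

-- proof-only abbreviations for the four keyword lists and the substring test
def pvKws1 : List String := ["law", "court", "judge", "case", "legal", "act", "statute"]
def pvKws2 : List String := ["science", "research", "study", "experiment", "data", "hypothesis"]
def pvKws3 : List String := ["story", "poem", "novel", "creative", "art", "music"]
def pvKws4 : List String := ["code", "algorithm", "software", "programming", "technical"]
def pvKl : List String := ["legal", "scientific", "creative", "technical"]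
def pvC (query : String) (kw : String) : Bool := PySem.Str.isIn kw (PySem.Str.lower query)
def pvN1 (q : String) : Nat := pvKws1.countP (pvC q)
def pvN2 (q : String) : Nat := pvKws2.countP (pvC q)
def pvN3 (q : String) : Nat := pvKws3.countP (pvC q)
def pvN4 (q : String) : Nat := pvKws4.countP (pvC q)

-- A's scores dict, exactly as the port builds it
def pvD0 : PySem.Dict String (Int) :=
  PySem.Dict.mk [("legal", 0), ("scientific", 0), ("creative", 0), ("technical", 0)]
def pvF (q : String) (k : String) (kws : List String) (d : PySem.Dict String Int) : PySem.Dict String Int :=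
  kws.foldl (fun d kw => if pvC q kw then d.modify k 0 (· + 1) else d) d
def pvS (q : String) : PySem.Dict String Int :=
  pvKwDictA.items.foldl
    (fun d p =>
      p.2.foldl (fun d kw => if pvC q kw then d.modify p.1 0 (· + 1) else d) d)
    (pvKwDictA.keys.foldl (fun d domain => d.insert domain 0) PySem.Dict.empty)

-- A's tail as a function of the four counts (key function written as a closed if-chain)
def pvKey (a b c d : Int) : String → Int :=
  fun k => if k = "legal" then a else if k = "scientific" then b else if k = "creative" then c else d
def pvAraw (a b c d : Int) : String :=
  match PySem.List.max? [a, b, c, d] (fun v => v) with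
  | none => "general"
  | some m =>
    if m > 0 then
      match PySem.List.max? pvKl (pvKey a b c d) with
      | none => "general"
      | some dom => dom
    else "general"

-- B's selection fold as a function of the four counts
def pvBencode (a b c d : Nat) : String :=
  (([("legal", a), ("scientific", b), ("creative", c), ("technical", d)] : List (String × Nat)).foldl
      (fun (acc : String × Int) p => if ((p.2 : Int) > acc.2) then (p.1, (p.2 : Int)) else acc)
      ("general", 0)).1

-- the per-domain conditional-modify loop: lookups at the touched key gain the count, others are unchanged
theorem pv_getD_condmodify_self (l : List String) (c : String → Bool) (k : String) :
    ∀ d : PySem.Dict String Int,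
      (l.foldl (fun d kw => if c kw then d.modify k 0 (· + 1) else d) d).getD k 0
        = d.getD k 0 + (l.countP c : Nat) := by
  induction l with
  | nil => intro d; simp
  | cons x t ih =>
    intro d
    simp only [List.foldl_cons, List.countP_cons]
    by_cases hx : c x
    · simp [hx, ih, PySem.Dict.getD_modify_self]; ring
    · simp [hx, ih]

theorem pv_getD_condmodify_ne (l : List String) (c : String → Bool) (k k' : String) (hne : k' ≠ k) :
    ∀ d : PySem.Dict String Int,
      (l.foldl (fun d kw => if c kw then d.modify k 0 (· + 1) else d) d).getD k' 0 = d.getD k' 0 := by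
  induction l with
  | nil => intro d; simp
  | cons x t ih =>
    intro d
    simp only [List.foldl_cons]
    by_cases hx : c x
    · simp [hx, ih, PySem.Dict.getD_modify_of_ne _ _ _ hne]
    · simp [hx, ih]

theorem pv_keys_condmodify (l : List String) (c : String → Bool) (k : String) :
    ∀ d : PySem.Dict String Int, d.contains k = true →
      (l.foldl (fun d kw => if c kw then d.modify k 0 (· + 1) else d) d).keys = d.keys := by
  induction l with
  | nil => intro d _; simp
  | cons x t ih =>
    intro d hk
    simp only [List.foldl_cons]
    by_cases hx : c x
    · simp only [hx, if_true]
      rw [ih _ (by simp [PySem.Dict.contains_modify, hk])]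
      rw [PySem.Dict.keys_modify, PySem.Dict.keys_insert_of_contains _ _ hk]
    · simp only [hx]
      exact ih _ hk

-- first extremal element only looks at the key on the list's members (plus the running best, itself a member)
theorem pv_max?_congr {α κ : Type} [LT κ] [DecidableLT κ] (xs : List α) (k1 k2 : α → κ)
    (h : ∀ x ∈ xs, k1 x = k2 x) : PySem.List.max? xs k1 = PySem.List.max? xs k2 := by
  unfold PySem.List.max?
  suffices H : ∀ (acc : Option α), (∀ m, acc = some m → k1 m = k2 m) →
      xs.foldl (fun acc x => match acc with
        | none => some x
        | some m => if k1 m < k1 x then some x else some m) acc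
      = xs.foldl (fun acc x => match acc with
        | none => some x
        | some m => if k2 m < k2 x then some x else some m) acc by
    exact H none (by intro m hm; cases hm)
  induction xs with
  | nil => intro acc _; rfl
  | cons x t ih =>
    intro acc hacc
    have hx : k1 x = k2 x := h x (by simp)
    simp only [List.foldl_cons]
    cases acc with
    | none =>
      dsimp only
      exact ih (fun y hy => h y (by simp [hy])) (some x) (by intro m hm; cases hm; exact hx)
    | some m =>
      have hm : k1 m = k2 m := hacc m rfl
      dsimp only
      rw [hm, hx]
      by_cases hlt : k2 m < k2 x
      · simp only [hlt, if_true]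
        exact ih (fun y hy => h y (by simp [hy])) (some x) (by intro n hn; cases hn; exact hx)
      · simp only [hlt, if_false]
        exact ih (fun y hy => h y (by simp [hy])) (some m) (by intro n hn; cases hn; exact hm)

-- unrolling a fold over a four-element literal list
theorem pv_foldl4 {a b : Type} (f : b -> a -> b) (i : b) (x1 x2 x3 x4 : a) :
    List.foldl f i [x1, x2, x3, x4] = f (f (f (f i x1) x2) x3) x4 := rfl

-- A's scores dict is the four per-domain loops in sequence
theorem pvS_eq (q : String) :
    pvS q = pvF q "technical" pvKws4 (pvF q "creative" pvKws3 (pvF q "scientific" pvKws2 (pvF q "legal" pvKws1 pvD0))) := by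
  unfold pvS
  rw [show pvKwDictA.items = [("legal", pvKws1), ("scientific", pvKws2), ("creative", pvKws3), ("technical", pvKws4)] from rfl,
      pv_foldl4]
  rfl

-- the per-domain loop, packaged at pvF (so rw can target it)
theorem pvF_keys (q k : String) (kws : List String) (d : PySem.Dict String Int)
    (hk : d.contains k = true) : (pvF q k kws d).keys = d.keys :=
  pv_keys_condmodify kws (pvC q) k d hk

theorem pvF_getD_self (q k : String) (kws : List String) (d : PySem.Dict String Int) :
    (pvF q k kws d).getD k 0 = d.getD k 0 + (kws.countP (pvC q) : Nat) :=
  pv_getD_condmodify_self kws (pvC q) k d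

theorem pvF_getD_ne (q k k' : String) (kws : List String) (d : PySem.Dict String Int)
    (hne : k' ≠ k) : (pvF q k kws d).getD k' 0 = d.getD k' 0 :=
  pv_getD_condmodify_ne kws (pvC q) k k' hne d

-- keys of A's scores dict
theorem pvS_keys (q : String) : (pvS q).keys = pvKl := by
  rw [pvS_eq]
  have h1 : (pvF q "legal" pvKws1 pvD0).keys = pvKl := pvF_keys _ _ _ _ (by decide)
  have c2 : (pvF q "legal" pvKws1 pvD0).contains "scientific" = true :=
    (PySem.Dict.contains_iff_mem_keys _ _).mpr (by rw [h1]; decide)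
  have h2 : (pvF q "scientific" pvKws2 (pvF q "legal" pvKws1 pvD0)).keys = pvKl := by
    rw [pvF_keys _ _ _ _ c2, h1]
  have c3 : (pvF q "scientific" pvKws2 (pvF q "legal" pvKws1 pvD0)).contains "creative" = true :=
    (PySem.Dict.contains_iff_mem_keys _ _).mpr (by rw [h2]; decide)
  have h3 : (pvF q "creative" pvKws3 (pvF q "scientific" pvKws2 (pvF q "legal" pvKws1 pvD0))).keys = pvKl := by
    rw [pvF_keys _ _ _ _ c3, h2]
  have c4 : (pvF q "creative" pvKws3 (pvF q "scientific" pvKws2 (pvF q "legal" pvKws1 pvD0))).contains "technical" = true :=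
    (PySem.Dict.contains_iff_mem_keys _ _).mpr (by rw [h3]; decide)
  rw [pvF_keys _ _ _ _ c4, h3]

-- lookups in A's scores dict are exactly the four counts
theorem pvS_getD_legal (q : String) : (pvS q).getD "legal" 0 = (pvN1 q : Nat) := by
  rw [pvS_eq, pvF_getD_ne _ _ _ _ _ (by decide), pvF_getD_ne _ _ _ _ _ (by decide),
      pvF_getD_ne _ _ _ _ _ (by decide), pvF_getD_self]
  rw [show pvD0.getD "legal" 0 = (0:Int) from rfl, zero_add]
  rfl

theorem pvS_getD_scientific (q : String) : (pvS q).getD "scientific" 0 = (pvN2 q : Nat) := by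
  rw [pvS_eq, pvF_getD_ne _ _ _ _ _ (by decide), pvF_getD_ne _ _ _ _ _ (by decide),
      pvF_getD_self, pvF_getD_ne _ _ _ _ _ (by decide)]
  rw [show pvD0.getD "scientific" 0 = (0:Int) from rfl, zero_add]
  rfl

theorem pvS_getD_creative (q : String) : (pvS q).getD "creative" 0 = (pvN3 q : Nat) := by
  rw [pvS_eq, pvF_getD_ne _ _ _ _ _ (by decide), pvF_getD_self,
      pvF_getD_ne _ _ _ _ _ (by decide), pvF_getD_ne _ _ _ _ _ (by decide)]
  rw [show pvD0.getD "creative" 0 = (0:Int) from rfl, zero_add]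
  rfl

theorem pvS_getD_technical (q : String) : (pvS q).getD "technical" 0 = (pvN4 q : Nat) := by
  rw [pvS_eq, pvF_getD_self, pvF_getD_ne _ _ _ _ _ (by decide),
      pvF_getD_ne _ _ _ _ _ (by decide), pvF_getD_ne _ _ _ _ _ (by decide)]
  rw [show pvD0.getD "technical" 0 = (0:Int) from rfl, zero_add]
  rfl

theorem pvS_values (q : String) :
    (pvS q).values = [((pvN1 q : Nat) : Int), (pvN2 q : Nat), (pvN3 q : Nat), (pvN4 q : Nat)] := by
  have hnd : (pvS q).keys.Nodup := by rw [pvS_keys]; decide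
  rw [PySem.Dict.values_eq_map_keys _ hnd 0, pvS_keys]
  simp only [pvKl, List.map_cons, List.map_nil]
  rw [pvS_getD_legal, pvS_getD_scientific, pvS_getD_creative, pvS_getD_technical]

-- A's port equals its count form
set_option maxHeartbeats 1000000 in
theorem pvA_char (q : String) :
    keyword_based_domain_detection_py q
      = pvAraw (pvN1 q) (pvN2 q) (pvN3 q) (pvN4 q) := by
  unfold keyword_based_domain_detection_py
  dsimp only
  rw [show (pvKwDictA.items.foldl
      (fun d p =>
        p.2.foldl (fun d kw => if PySem.Str.isIn kw (PySem.Str.lower q) then d.modify p.1 0 (· + 1) else d) d)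
      (pvKwDictA.keys.foldl (fun d domain => d.insert domain 0) PySem.Dict.empty)) = pvS q from rfl]
  rw [pvS_values, pvS_keys]
  have hkey : PySem.List.max? pvKl (fun k => (pvS q).getD k 0)
      = PySem.List.max? pvKl (pvKey (pvN1 q) (pvN2 q) (pvN3 q) (pvN4 q)) := by
    apply pv_max?_congr
    intro x hx
    fin_cases hx <;>
      simp [pvKey, pvS_getD_legal, pvS_getD_scientific, pvS_getD_creative, pvS_getD_technical]
  rw [hkey]
  rfl

-- membership in the inner per-position fold: everything already there, plus the keywords passing the test
theorem pv_mem_inner (kws : List String) (c : String → Bool) (x : String) :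
    ∀ s0 : PySem.Set String,
      (x ∈ kws.foldl (fun s kw => if c kw then PySem.Set.add s kw else s) s0) ↔
        (x ∈ s0 ∨ (x ∈ kws ∧ c x = true)) := by
  induction kws with
  | nil => intro s0; simp
  | cons k t ih =>
    intro s0
    simp only [List.foldl_cons, List.mem_cons]
    by_cases hk : c k = true
    · simp only [hk, if_true]
      rw [ih]
      simp only [PySem.Set.mem_add]
      constructor
      · rintro ((h | rfl) | ⟨h, hc⟩)
        · exact Or.inl h
        · exact Or.inr ⟨Or.inl rfl, hk⟩
        · exact Or.inr ⟨Or.inr h, hc⟩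
      · rintro (h | ⟨(rfl | h), hc⟩)
        · exact Or.inl (Or.inl h)
        · exact Or.inl (Or.inr rfl)
        · exact Or.inr ⟨h, hc⟩
    · simp only [hk]
      rw [ih]
      constructor
      · rintro (h | ⟨h, hc⟩)
        · exact Or.inl h
        · exact Or.inr ⟨Or.inr h, hc⟩
      · rintro (h | ⟨(rfl | h), hc⟩)
        · exact Or.inl h
        · exact absurd hc hk
        · exact Or.inr ⟨h, hc⟩

-- membership in the outer position scan
theorem pv_mem_outer (js : List Int) (kws : List String) (c : Int → String → Bool) (x : String) :
    ∀ s0 : PySem.Set String,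
      (x ∈ js.foldl
          (fun s i => kws.foldl (fun s kw => if c i kw then PySem.Set.add s kw else s) s)
          s0) ↔
        (x ∈ s0 ∨ ∃ i ∈ js, x ∈ kws ∧ c i x = true) := by
  induction js with
  | nil => intro s0; simp
  | cons j t ih =>
    intro s0
    simp only [List.foldl_cons, List.mem_cons]
    rw [ih, pv_mem_inner]
    constructor
    · rintro ((h | ⟨hm, hc⟩) | ⟨i, hi, hm, hc⟩)
      · exact Or.inl h
      · exact Or.inr ⟨j, Or.inl rfl, hm, hc⟩
      · exact Or.inr ⟨i, Or.inr hi, hm, hc⟩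
    · rintro (h | ⟨i, (rfl | hi), hm, hc⟩)
      · exact Or.inl (Or.inl h)
      · exact Or.inl (Or.inr ⟨hm, hc⟩)
      · exact Or.inr ⟨i, hi, hm, hc⟩

-- characterization of the matched-keyword set
theorem pv_found_mem (ql : String) (x : String) :
    x ∈ pvFoundB ql ↔
      ∃ i ∈ PySem.List.pyRange 0 (PySem.Str.len ql) 1,
        x ∈ pvAllKwsB ∧ PySem.Str.startswith (PySem.Str.slice ql (some i) none) x = true := by
  unfold pvFoundB
  rw [pv_mem_outer (PySem.List.pyRange 0 (PySem.Str.len ql) 1) pvAllKwsB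
      (fun i kw => PySem.Str.startswith (PySem.Str.slice ql (some i) none) kw) x PySem.Set.empty]
  simp [PySem.Set.empty]

-- a nonempty keyword is collected iff it is a substring
theorem pv_contains_found (q : String) (kw : String) (hmem : kw ∈ pvAllKwsB) (hne : kw.toList ≠ []) :
    PySem.Set.contains (pvFoundB (PySem.Str.lower q)) kw = pvC q kw := by
  rw [Bool.eq_iff_iff, PySem.Set.contains_iff, pv_found_mem, pvC, PySem.Str.isIn_iff_infix]
  rw [← PySem.Chars.isIn_iff_infix, ← PySem.Chars.exists_prefix_drop_iff_isIn]
  constructor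
  · rintro ⟨i, hi, -, hsw⟩
    have h01 := PySem.List.mem_pyRange_one.mp hi
    refine ⟨i.toNat, ?_⟩
    have hsl : (PySem.Str.slice (PySem.Str.lower q) (some i) none).toList
        = (PySem.Str.lower q).toList.drop i.toNat := by
      rw [PySem.Str.toList_slice, PySem.Chars.slice_eq_listSlice, PySem.List.slice_from _ h01.1]
    rw [PySem.Str.startswith_eq, hsl] at hsw
    exact (PySem.Chars.startswith_iff _ _).mp hsw
  · rintro ⟨j, hj⟩
    have hlen : kw.toList.length ≤ ((PySem.Str.lower q).toList.drop j).length := hj.length_le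
    have hkw1 : 1 ≤ kw.toList.length := List.length_pos_of_ne_nil hne
    have hjlt : j < (PySem.Str.lower q).toList.length := by
      simp only [List.length_drop] at hlen; omega
    refine ⟨(j : Int), ?_, hmem, ?_⟩
    · rw [PySem.List.mem_pyRange_one]
      constructor
      · exact_mod_cast Int.natCast_nonneg j
      · rw [PySem.Str.len_eq]
        exact_mod_cast hjlt
    · have hsl : (PySem.Str.slice (PySem.Str.lower q) (some (j : Int)) none).toList
        = (PySem.Str.lower q).toList.drop j := by
        rw [PySem.Str.toList_slice, PySem.Chars.slice_eq_listSlice, PySem.List.slice_from_natCast]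
      rw [PySem.Str.startswith_eq, hsl]
      exact (PySem.Chars.startswith_iff _ _).mpr hj

-- the four per-domain scores of B are the four counts
theorem pv_countP_found (q : String) (kws : List String) (hsub : ∀ kw ∈ kws, kw ∈ pvAllKwsB)
    (hne : ∀ kw ∈ kws, kw.toList ≠ []) :
    kws.countP (fun kw => PySem.Set.contains (pvFoundB (PySem.Str.lower q)) kw) = kws.countP (pvC q) :=
  List.countP_congr (fun kw hkw => by rw [pv_contains_found q kw (hsub kw hkw) (hne kw hkw)])

-- B's port equals its count form
set_option maxHeartbeats 1000000 in
theorem pvB_char (q : String) :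
    keyword_based_domain_detection_py_alt q = pvBencode (pvN1 q) (pvN2 q) (pvN3 q) (pvN4 q) := by
  have h1 : pvKws1.countP (fun kw => PySem.Set.contains (pvFoundB (PySem.Str.lower q)) kw) = pvN1 q :=
    pv_countP_found q pvKws1 (by intro kw hkw; fin_cases hkw <;> decide) (by intro kw hkw; fin_cases hkw <;> decide)
  have h2 : pvKws2.countP (fun kw => PySem.Set.contains (pvFoundB (PySem.Str.lower q)) kw) = pvN2 q :=
    pv_countP_found q pvKws2 (by intro kw hkw; fin_cases hkw <;> decide) (by intro kw hkw; fin_cases hkw <;> decide)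
  have h3 : pvKws3.countP (fun kw => PySem.Set.contains (pvFoundB (PySem.Str.lower q)) kw) = pvN3 q :=
    pv_countP_found q pvKws3 (by intro kw hkw; fin_cases hkw <;> decide) (by intro kw hkw; fin_cases hkw <;> decide)
  have h4 : pvKws4.countP (fun kw => PySem.Set.contains (pvFoundB (PySem.Str.lower q)) kw) = pvN4 q :=
    pv_countP_found q pvKws4 (by intro kw hkw; fin_cases hkw <;> decide) (by intro kw hkw; fin_cases hkw <;> decide)
  unfold keyword_based_domain_detection_py_alt pvBencode
  rw [show pvKwPairsB = [("legal", pvKws1), ("scientific", pvKws2), ("creative", pvKws3), ("technical", pvKws4)] from rfl]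
  dsimp only
  rw [pv_foldl4, pv_foldl4]
  dsimp only
  rw [h1, h2, h3, h4]

-- the finite comparison: counts are bounded by the keyword-list lengths, so check all cases
theorem pv_fin : ∀ (a : Fin 8) (b : Fin 7) (c : Fin 7) (d : Fin 6),
    pvAraw a.val b.val c.val d.val = pvBencode a.val b.val c.val d.val := by decide

theorem pv_combined (a b c d : Nat) (ha : a ≤ 7) (hb : b ≤ 6) (hc : c ≤ 6) (hd : d ≤ 5) :
    pvAraw a b c d = pvBencode a b c d := by
  have h := pv_fin ⟨a, by omega⟩ ⟨b, by omega⟩ ⟨c, by omega⟩ ⟨d, by omega⟩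
  simpa using h

-- ===== VERDICT (by name: the statement is the Claim_ definition above) =====
theorem keyword_based_domain_detection_py_spec : Claim_equal_keyword_based_domain_detection_py := by
  intro q _
  unfold Spec_keyword_based_domain_detection_py
  rw [pvA_char q, pvB_char q]
  exact pv_combined _ _ _ _
    (List.countP_le_length) (List.countP_le_length) (List.countP_le_length) (List.countP_le_length)
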